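-- pv_equiv track=rewrite | github.com/GyuCheol/happy_algorithm | 20_08_August/0811_42586_기능개발/source.py | solution
-- ===== SOURCE A (Python) =====
-- from collections import deque
--
-- def solution(progresses, speeds):
--     answer = []
--
--     # progress, speeds를 순차적으로 꺼낼 queue 생성
--     q = deque(zip(progresses, speeds))
--
--     # 모든 progress를 다 사용할 때까지
--     while q:
--         # q의 가장 첫 진행 꺼내기
--         p, s = q.popleft()
--
--         # 필요한 개발 기간 구하기
--         # 7.3일이라면 8일이 되어야 한다 -> 음수로 정수화 시키면 절댓값 기준 올림이 실행.
--         # -7.3 // 1 = -8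
--         # ※ 정수화는 현재 실수에서 가장 낮은 정수로 만든다.
--         days = -(100 - p) // s
--
--         cnt = 1
--
--         # 현재 q에 요소가 있고, 현재 q에 있는 작업의 진도가
--         # 방금 꺼낸 진도보다 빠르거나 같았던 경우는 함께 처리되니 개수를 같이 센다.
--         while q:
--             prog, spd = q[0] # 현재 남은 가장 첫 요소
--
--             tmp_days = -(100 - prog) // spd
--
--             # 방금 꺼낸 요소와 같이 빌드할 수 있다면, 같이 개수세고 queue에서 제거
--             if tmp_days >= days:
--                 cnt += 1
--                 q.popleft()
--             else:
--                 break
--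
--         answer.append(cnt)
--
--     return answer
-- ===== SOURCE B (Python) =====
-- def solution(progresses, speeds):
--     ds = [-(100 - p) // s for p, s in zip(progresses, speeds)]
--     answer = []
--     leader = None
--     cnt = 0
--     for d in ds:
--         if leader is not None and d >= leader:
--             cnt += 1
--         else:
--             if cnt:
--                 answer.append(cnt)
--             leader, cnt = d, 1
--     if cnt:
--         answer.append(cnt)
--     return answer
-- ===== Notes on version B (the rewrite author's own statement) =====
-- stated objective: simpler
-- what changed: Replaces the deque with nested while-loops by a precomputed days list and one flat scan keeping the current group's leader and count; no queue mutation or inner pop-loop.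
import Mathlib
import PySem

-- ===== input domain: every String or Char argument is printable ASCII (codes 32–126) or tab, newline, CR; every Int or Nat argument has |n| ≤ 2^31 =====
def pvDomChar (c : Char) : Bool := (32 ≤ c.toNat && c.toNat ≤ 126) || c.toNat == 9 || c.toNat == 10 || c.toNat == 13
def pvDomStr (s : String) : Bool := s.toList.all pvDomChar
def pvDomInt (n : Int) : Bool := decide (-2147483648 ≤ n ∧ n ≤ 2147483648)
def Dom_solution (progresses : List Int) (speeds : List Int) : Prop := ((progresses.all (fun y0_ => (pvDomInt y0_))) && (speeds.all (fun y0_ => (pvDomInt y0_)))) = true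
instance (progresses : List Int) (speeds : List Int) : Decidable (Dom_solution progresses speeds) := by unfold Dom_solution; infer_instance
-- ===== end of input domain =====

-- B replaces A's deque with nested while-loops by a precomputed days list and one flat scan
-- carrying the current group's leader and count (objective: simpler).

-- ===== PORT A =====
-- inner `while q:` loop: pops leading tasks whose days ≥ days of the group leader, counting them
def solutionInner (days : Int) (cnt : Int) : List (Int × Int) → Int × List (Int × Int)
  | [] => (cnt, [])
  | (prog, spd) :: rest =>
    let tmp_days := PySem.Int.floordiv (-(100 - prog)) spd
    if tmp_days ≥ days then solutionInner days (cnt + 1) rest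
    else (cnt, (prog, spd) :: rest)

-- termination measure for the outer loop (cited by decreasing_by below)
theorem solutionInner_len_le (days cnt : Int) (q : List (Int × Int)) :
    (solutionInner days cnt q).2.length ≤ q.length := by
  induction q generalizing cnt with
  | nil => simp [solutionInner]
  | cons h t ih =>
    obtain ⟨prog, spd⟩ := h
    simp only [solutionInner]
    split
    · exact Nat.le_succ_of_le (ih _)
    · simp

-- outer `while q:` loop
def solutionOuter : List (Int × Int) → List Int
  | [] => []
  | (p, s) :: rest =>
    let days := PySem.Int.floordiv (-(100 - p)) s
    let r := solutionInner days 1 rest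
    r.1 :: solutionOuter r.2
termination_by q => q.length
decreasing_by
  exact Nat.lt_succ_of_le (solutionInner_len_le _ 1 rest)

def solution (progresses : List Int) (speeds : List Int) : List Int :=
  solutionOuter (progresses.zip speeds)

-- ===== PORT B =====
-- Source B's for-loop over the days list, with state (current leader, current count);
-- the answer entries emitted from this point on are returned directly.
def altLoop (leader : Option Int) (cnt : Int) : List Int → List Int
  | [] => if cnt ≠ 0 then [cnt] else []
  | d :: rest =>
    match leader with
    | some l =>
      if d ≥ l then altLoop leader (cnt + 1) rest
      else (if cnt ≠ 0 then [cnt] else []) ++ altLoop (some d) 1 rest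
    | none => (if cnt ≠ 0 then [cnt] else []) ++ altLoop (some d) 1 rest

def solution_alt (progresses : List Int) (speeds : List Int) : List Int :=
  let ds := (progresses.zip speeds).map (fun pr => PySem.Int.floordiv (-(100 - pr.1)) pr.2)
  altLoop none 0 ds

-- ===== PRECONDITION & SPEC =====
-- Pre_ excludes exactly the inputs where Python A raises ZeroDivisionError: a zero speed among the zipped pairs.
def Pre_solution (progresses : List Int) (speeds : List Int) : Prop :=
  ∀ pr ∈ progresses.zip speeds, pr.2 ≠ 0
instance (progresses : List Int) (speeds : List Int) : Decidable (Pre_solution progresses speeds) := by unfold Pre_solution; infer_instance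
def pvWitness_solution : List Int × List Int := ([93, 30, 55], [1, 30, 5])

def Spec_solution (progresses : List Int) (speeds : List Int) (out : List Int) : Prop := out = solution_alt progresses speeds
instance (progresses : List Int) (speeds : List Int) (out : List Int) : Decidable (Spec_solution progresses speeds out) := by unfold Spec_solution; infer_instance

-- ===== CLAIM (what is proved, stated in full; the proofs are below) =====
def Claim_equal_solution : Prop := ∀ (progresses : List Int) (speeds : List Int), Dom_solution progresses speeds → Pre_solution progresses speeds → Spec_solution progresses speeds (solution progresses speeds)

-- ===== LEMMAS AND PROOFS =====

-- B's scan with an active leader tracks A's inner loop: it emits the inner count and continues as the outer loop.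
theorem solutionOuter_nil : solutionOuter [] = [] := by
  rw [solutionOuter.eq_def]

theorem altLoop_some_eq (q : List (Int × Int)) : ∀ (days cnt : Int), 0 < cnt →
    altLoop (some days) cnt (q.map (fun pr => PySem.Int.floordiv (-(100 - pr.1)) pr.2))
      = (solutionInner days cnt q).1 :: solutionOuter (solutionInner days cnt q).2 := by
  induction q with
  | nil =>
    intro days cnt hc
    simp only [List.map_nil, altLoop, solutionInner, solutionOuter_nil,
      if_pos (show cnt ≠ 0 by omega)]
  | cons h t ih =>
    intro days cnt hc
    obtain ⟨prog, spd⟩ := h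
    simp only [List.map_cons, altLoop, solutionInner]
    by_cases hge : PySem.Int.floordiv (-(100 - prog)) spd ≥ days
    · rw [if_pos hge, if_pos hge, ih days (cnt + 1) (by omega)]
    · rw [if_neg hge, if_neg hge, if_pos (show cnt ≠ 0 by omega),
        ih (PySem.Int.floordiv (-(100 - prog)) spd) 1 one_pos, solutionOuter]
      rfl

theorem alt_eq_outer (q : List (Int × Int)) :
    altLoop none 0 (q.map (fun pr => PySem.Int.floordiv (-(100 - pr.1)) pr.2)) = solutionOuter q := by
  cases q with
  | nil => simp only [List.map_nil, altLoop, solutionOuter_nil]; rfl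
  | cons h t =>
    obtain ⟨p, s⟩ := h
    simp only [List.map_cons, altLoop]
    rw [altLoop_some_eq t (PySem.Int.floordiv (-(100 - p)) s) 1 one_pos, solutionOuter]
    rfl

-- ===== VERDICT (by name: the statement is the Claim_ definition above) =====
theorem solution_spec : Claim_equal_solution := by
  intro progresses speeds _ _
  unfold Spec_solution solution solution_alt
  exact (alt_eq_outer (progresses.zip speeds)).symm
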